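-- pv_equiv track=rewrite | github.com/TomasRacil/Python | Projekty/VyrokoveTabulky/modules/formule.py | pqr
-- ===== SOURCE A (Python) =====
-- def pqr(s):
--     p = 0
--     q = 0
--     r = 0
--     for znak in s:
--         if znak == "p":
--             p = 1
--         elif znak == "q":
--             q = 1
--         elif znak == "r":
--             r = 1
--     string = (p*'p' + q*'q' + r*'r')
--     return (string)
-- ===== SOURCE B (Python) =====
-- def pqr(s):
--     return "".join(c for c in "pqr" if c in s)
-- ===== Notes on version B (the rewrite author's own statement) =====
-- stated objective: idiomatic
-- what changed: Instead of one Python-level pass over s maintaining three flags, B iterates over the fixed three-character target alphabet and keeps each character found by a membership test against s, joining the survivors; the per-character scans run in C, which a timing run measured as much faster.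
import Mathlib
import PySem

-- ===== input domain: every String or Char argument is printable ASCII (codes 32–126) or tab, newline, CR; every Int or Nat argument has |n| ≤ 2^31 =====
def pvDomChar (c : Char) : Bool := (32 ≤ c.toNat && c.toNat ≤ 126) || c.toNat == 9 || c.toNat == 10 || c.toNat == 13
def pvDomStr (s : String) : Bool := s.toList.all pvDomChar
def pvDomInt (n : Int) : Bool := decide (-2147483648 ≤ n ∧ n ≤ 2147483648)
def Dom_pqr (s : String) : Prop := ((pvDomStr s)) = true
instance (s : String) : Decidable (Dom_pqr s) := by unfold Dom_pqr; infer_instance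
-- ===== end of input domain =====

-- B scans the fixed alphabet "pqr" with a membership test per character instead of A's
-- single flag-accumulating pass over s (objective: more idiomatic; same output).

-- ===== PORT A =====
-- the for-loop over s updating the three flags p, q, r
def pqrLoop : List Char → Int → Int → Int → Int × Int × Int
  | [], p, q, r => (p, q, r)
  | znak :: rest, p, q, r =>
    if znak = 'p' then pqrLoop rest 1 q r
    else if znak = 'q' then pqrLoop rest p 1 r
    else if znak = 'r' then pqrLoop rest p q 1
    else pqrLoop rest p q r

def pqr (s : String) : String :=
  let (p, q, r) := pqrLoop s.toList 0 0 0
  String.mk (PySem.List.pyRepeat ['p'] p ++ PySem.List.pyRepeat ['q'] q ++ PySem.List.pyRepeat ['r'] r)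

-- ===== PORT B =====
def pqr_alt (s : String) : String :=
  String.mk (['p', 'q', 'r'].filter (fun c => PySem.Chars.isIn [c] s.toList))

-- ===== PRECONDITION & SPEC =====
def Spec_pqr (s : String) (out : String) : Prop := out = pqr_alt s
instance (s : String) (out : String) : Decidable (Spec_pqr s out) := by unfold Spec_pqr; infer_instance

-- ===== CLAIM (what is proved, stated in full; the proofs are below) =====
def Claim_equal_pqr : Prop := ∀ (s : String), Dom_pqr s → Spec_pqr s (pqr s)

-- ===== LEMMAS AND PROOFS =====
theorem isIn_singleton (c : Char) (l : List Char) :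
    PySem.Chars.isIn [c] l = decide (c ∈ l) := by
  by_cases h : c ∈ l
  · simp [h]
    rw [PySem.Chars.isIn_iff_infix]
    obtain ⟨a, b, rfl⟩ := List.append_of_mem h
    exact ⟨a, b, by simp⟩
  · simp [h]
    rw [PySem.Chars.isIn_eq_false_iff]
    intro hinf
    exact h (hinf.mem (by simp))

theorem pqrLoop_eq (l : List Char) (p q r : Int) :
    pqrLoop l p q r =
      ((if 'p' ∈ l then 1 else p), (if 'q' ∈ l then 1 else q), (if 'r' ∈ l then 1 else r)) := by
  induction l generalizing p q r with
  | nil => simp [pqrLoop]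
  | cons c rest ih =>
    by_cases hp : c = 'p'
    · subst hp; simp [pqrLoop, ih]
    · by_cases hq : c = 'q'
      · subst hq; simp [pqrLoop, hp, ih, Ne.symm hp]
      · by_cases hr : c = 'r'
        · subst hr; simp [pqrLoop, hp, hq, ih, Ne.symm hp, Ne.symm hq]
        · simp [pqrLoop, hp, hq, hr, ih, Ne.symm hp, Ne.symm hq, Ne.symm hr]

-- ===== VERDICT (by name: the statement is the Claim_ definition above) =====
theorem pqr_spec : Claim_equal_pqr := by
  intro s _
  unfold Spec_pqr pqr pqr_alt
  rw [pqrLoop_eq]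
  simp only [List.filter, isIn_singleton]
  by_cases hp : 'p' ∈ s.toList <;> by_cases hq : 'q' ∈ s.toList <;> by_cases hr : 'r' ∈ s.toList <;>
    simp [hp, hq, hr, PySem.List.pyRepeat]
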